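-- pv_equiv track=rewrite | github.com/Tycho-Svoboda/fusionagent | fusionagent/harness/benchmark.py | _build_shape_matrix
-- ===== SOURCE A (Python) =====
-- from typing import Callable, List, Optional, Tuple
--
-- BATCH_SIZES = [1, 4, 32]
--
-- SEQ_LENS = [1, 128, 1337]
--
-- def _build_shape_matrix(
--     template_shapes: List[tuple],
-- ) -> List[List[tuple]]:
--     """Generate a list of shape-sets by varying batch/seqlen dimensions.
--
--     Each entry in the returned list is a list of shapes (one per input tensor).
--     For 3D+ templates we do a cartesian product over batch and seqlen; for 2D
--     we vary only batch; for 1D/0D we return the template as-is.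
--     """
--     if not template_shapes:
--         return []
--
--     first = template_shapes[0]
--     ndim = len(first)
--
--     if ndim >= 3:
--         # Cartesian product of batch_sizes x seq_lens
--         result = []
--         for b in BATCH_SIZES:
--             for s in SEQ_LENS:
--                 shapes = []
--                 for tmpl in template_shapes:
--                     new_shape = (b, s) + tmpl[2:]
--                     shapes.append(new_shape)
--                 result.append(shapes)
--         return result
--
--     if ndim == 2:
--         # Vary batch dim only
--         result = []
--         for b in BATCH_SIZES:
--             shapes = []
--             for tmpl in template_shapes:
--                 new_shape = (b,) + tmpl[1:]
--                 shapes.append(new_shape)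
--             result.append(shapes)
--         return result
--
--     # 1D or scalar — just use the template as-is
--     return [list(template_shapes)]
-- ===== SOURCE B (Python) =====
-- from typing import List
--
-- BATCH_SIZES = [1, 4, 32]
--
-- SEQ_LENS = [1, 128, 1337]
--
--
-- def _build_shape_matrix(
--     template_shapes: List[tuple],
-- ) -> List[List[tuple]]:
--     """Column-major construction: build each template's variant column,
--     then transpose the columns into shape-sets with zip(*...)."""
--     if not template_shapes:
--         return []
--     ndim = len(template_shapes[0])
--     if ndim >= 3:
--         def variants(t):
--             return [(b, s) + t[2:] for b in BATCH_SIZES for s in SEQ_LENS]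
--     elif ndim == 2:
--         def variants(t):
--             return [(b,) + t[1:] for b in BATCH_SIZES]
--     else:
--         return [list(template_shapes)]
--     columns = [variants(t) for t in template_shapes]
--     return [list(row) for row in zip(*columns)]
-- ===== Notes on version B (the rewrite author's own statement) =====
-- stated objective: alternative
-- what changed: B builds the matrix column-major: it computes each template's list of variant shapes (its column) and then transposes the columns into shape-sets with zip(*columns), instead of A's row-by-row enumeration of (batch, seqlen) prefixes across all templates.
import Mathlib
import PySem

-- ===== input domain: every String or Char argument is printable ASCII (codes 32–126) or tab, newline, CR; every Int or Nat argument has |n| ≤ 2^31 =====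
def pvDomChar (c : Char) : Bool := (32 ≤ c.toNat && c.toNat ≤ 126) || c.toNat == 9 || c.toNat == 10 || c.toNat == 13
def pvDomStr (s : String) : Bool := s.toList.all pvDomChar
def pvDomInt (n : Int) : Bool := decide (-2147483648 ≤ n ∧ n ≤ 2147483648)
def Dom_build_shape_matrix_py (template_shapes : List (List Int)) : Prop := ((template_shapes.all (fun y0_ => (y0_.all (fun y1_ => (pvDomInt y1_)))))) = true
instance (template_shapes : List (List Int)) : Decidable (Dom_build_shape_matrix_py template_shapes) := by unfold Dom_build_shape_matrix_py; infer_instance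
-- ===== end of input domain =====

-- B builds the matrix column-major (one variant column per template, then a
-- zip(*)-style transpose) instead of A's row-by-row prefix enumeration (objective: alternative).

def pvBATCH_SIZES : List Int := [1, 4, 32]
def pvSEQ_LENS : List Int := [1, 128, 1337]

-- ===== PORT A =====
def build_shape_matrix_py (template_shapes : List (List Int)) : List (List (List Int)) :=
  match template_shapes with
  | [] => []
  | first :: _ =>
    let ndim : Int := first.length
    if ndim ≥ 3 then
      pvBATCH_SIZES.foldl (fun result b =>
        pvSEQ_LENS.foldl (fun result s =>
          result ++ [template_shapes.foldl (fun shapes tmpl =>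
            shapes ++ [[b, s] ++ PySem.List.slice tmpl (some 2) none]) []]) result) []
    else if ndim = 2 then
      pvBATCH_SIZES.foldl (fun result b =>
        result ++ [template_shapes.foldl (fun shapes tmpl =>
          shapes ++ [[b] ++ PySem.List.slice tmpl (some 1) none]) []]) []
    else
      [template_shapes]

-- ===== PORT B =====
-- step-for-step port of zip(*columns): pop the head of every column, repeat
def pvHeads? {α : Type} (cols : List (List α)) : Option (List α × List (List α)) :=
  cols.foldr (fun c acc =>
    match c, acc with
    | x :: xs, some (hs, ts) => some (x :: hs, xs :: ts)
    | _, _ => none) (some ([], []))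

def pvZipStarAux {α : Type} : Nat → List (List α) → List (List α)
  | 0, _ => []
  | n + 1, cols =>
    match pvHeads? cols with
    | some (hs, ts) => hs :: pvZipStarAux n ts
    | none => []

-- zip stops at the shortest column; the first column's length bounds the rounds
def pvZipStar {α : Type} (cols : List (List α)) : List (List α) :=
  pvZipStarAux (match cols with | [] => 0 | c :: _ => c.length) cols

def build_shape_matrix_py_alt (template_shapes : List (List Int)) : List (List (List Int)) :=
  match template_shapes with
  | [] => []
  | first :: _ =>
    let ndim : Int := first.length
    if ndim ≥ 3 then
      let columns := template_shapes.map (fun t =>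
        pvBATCH_SIZES.flatMap (fun b => pvSEQ_LENS.map (fun s =>
          [b, s] ++ PySem.List.slice t (some 2) none)))
      pvZipStar columns
    else if ndim = 2 then
      let columns := template_shapes.map (fun t =>
        pvBATCH_SIZES.map (fun b => [b] ++ PySem.List.slice t (some 1) none))
      pvZipStar columns
    else
      [template_shapes]

-- ===== PRECONDITION & SPEC =====
def Spec_build_shape_matrix_py (template_shapes : List (List Int)) (out : List (List (List Int))) : Prop := out = build_shape_matrix_py_alt template_shapes
instance (template_shapes : List (List Int)) (out : List (List (List Int))) : Decidable (Spec_build_shape_matrix_py template_shapes out) := by unfold Spec_build_shape_matrix_py; infer_instance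

-- ===== CLAIM (what is proved, stated in full; the proofs are below) =====
def Claim_equal_build_shape_matrix_py : Prop := ∀ (template_shapes : List (List Int)), Dom_build_shape_matrix_py template_shapes → Spec_build_shape_matrix_py template_shapes (build_shape_matrix_py template_shapes)

-- ===== LEMMAS AND PROOFS =====

theorem pv_flatten_map_singleton {α β : Type} (f : α → β) (l : List α) :
    (l.map (fun x => [f x])).flatten = l.map f := by
  induction l with
  | nil => rfl
  | cons x xs ih => simp [ih]

theorem pvHeads?_map_cons {α β : Type} (g : α → β) (h : α → List β) (l : List α) :
    pvHeads? (l.map (fun t => g t :: h t)) = some (l.map g, l.map h) := by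
  induction l with
  | nil => rfl
  | cons x xs ih => simp [pvHeads?] at ih ⊢; rw [ih]

theorem pv_zipAux_map {α β γ : Type} (f : γ → α → β) (ps : List γ) (l : List α) :
    pvZipStarAux ps.length (l.map (fun x => ps.map (fun p => f p x))) =
      ps.map (fun p => l.map (fun x => f p x)) := by
  induction ps generalizing l with
  | nil => rfl
  | cons p ps ih =>
    have h := pvHeads?_map_cons (fun x => f p x) (fun x => ps.map (fun q => f q x)) l
    simp only [List.length_cons, pvZipStarAux, List.map_cons]
    rw [h]
    simp [ih]

theorem pv_zipStar_map {α β γ : Type} (f : γ → α → β) (ps : List γ) (t : α) (rest : List α) :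
    pvZipStar ((t :: rest).map (fun x => ps.map (fun p => f p x))) =
      ps.map (fun p => (t :: rest).map (fun x => f p x)) := by
  have := pv_zipAux_map f ps (t :: rest)
  simpa [pvZipStar] using this

-- ===== VERDICT (by name: the statement is the Claim_ definition above) =====
theorem build_shape_matrix_py_spec : Claim_equal_build_shape_matrix_py := by
  intro ts _
  unfold Spec_build_shape_matrix_py build_shape_matrix_py build_shape_matrix_py_alt
  match ts with
  | [] => rfl
  | first :: rest =>
    by_cases h3 : (3 : Int) ≤ (first.length : Int)
    · simp only [ge_iff_le, h3, if_true]
      have hcols : (first :: rest).map (fun t =>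
            pvBATCH_SIZES.flatMap (fun b => pvSEQ_LENS.map (fun s =>
              [b, s] ++ PySem.List.slice t (some 2) none))) =
          (first :: rest).map (fun t =>
            (pvBATCH_SIZES.flatMap (fun b => pvSEQ_LENS.map (fun s => [b, s]))).map
              (fun p => p ++ PySem.List.slice t (some 2) none)) := by
        simp [pvBATCH_SIZES, pvSEQ_LENS]
      rw [hcols, pv_zipStar_map (fun p x => p ++ PySem.List.slice x (some 2) none)]
      simp [pvBATCH_SIZES, pvSEQ_LENS, pv_flatten_map_singleton]
    · by_cases h2 : (first.length : Int) = 2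
      · simp only [ge_iff_le, h3, h2, if_true]
        have hcols : (first :: rest).map (fun t =>
              pvBATCH_SIZES.map (fun b => [b] ++ PySem.List.slice t (some 1) none)) =
            (first :: rest).map (fun t =>
              (pvBATCH_SIZES.map (fun b => [b])).map
                (fun p => p ++ PySem.List.slice t (some 1) none)) := by
          simp [pvBATCH_SIZES]
        rw [hcols, pv_zipStar_map (fun p x => p ++ PySem.List.slice x (some 1) none)]
        simp [pvBATCH_SIZES, pv_flatten_map_singleton]
      · simp [h3, h2]
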